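-- pv_equiv track=rewrite | github.com/fescofesco/CCC | Challenge 2025/Felix/level5/test_corrected.py | get_path_CORRECTED
-- ===== SOURCE A (Python) =====
-- def get_path_CORRECTED(x_sequence, y_sequence):
--     """NO DIAGONAL MOVES - X and Y movements are sequential"""
--     path = [(0, 0)]  # Start at origin
--
--     x_idx = 0
--     x_pos = 0
--     x_elapsed = 0
--
--     y_idx = 0
--     y_pos = 0
--     y_elapsed = 0
--
--     while x_idx < len(x_sequence) or y_idx < len(y_sequence):
--         x_needs_move = False
--         y_needs_move = False
--
--         # Check if X needs to move
--         if x_idx < len(x_sequence):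
--             x_pace = x_sequence[x_idx]
--             if x_elapsed == 0 and x_pace != 0:
--                 x_needs_move = True
--
--         # Check if Y needs to move
--         if y_idx < len(y_sequence):
--             y_pace = y_sequence[y_idx]
--             if y_elapsed == 0 and y_pace != 0:
--                 y_needs_move = True
--
--         # If both need to move, move X first, record, then move Y, record
--         if x_needs_move and y_needs_move:
--             # Move X first
--             x_pos += 1 if x_sequence[x_idx] > 0 else -1
--             path.append((x_pos, y_pos))
--
--             # Then move Y
--             y_pos += 1 if y_sequence[y_idx] > 0 else -1
--             path.append((x_pos, y_pos))
--
--         elif x_needs_move: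
--             # Only X moves
--             x_pos += 1 if x_sequence[x_idx] > 0 else -1
--             path.append((x_pos, y_pos))
--
--         elif y_needs_move:
--             # Only Y moves
--             y_pos += 1 if y_sequence[y_idx] > 0 else -1
--             path.append((x_pos, y_pos))
--
--         else:
--             # Neither moves, just time passing
--             path.append((x_pos, y_pos))
--
--         # Advance time for X
--         if x_idx < len(x_sequence):
--             x_pace = x_sequence[x_idx]
--             pace_duration = abs(x_pace) if x_pace != 0 else 1
--             x_elapsed += 1
--             if x_elapsed >= pace_duration:
--                 x_idx += 1
--                 x_elapsed = 0
--
--         # Advance time for Y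
--         if y_idx < len(y_sequence):
--             y_pace = y_sequence[y_idx]
--             pace_duration = abs(y_pace) if y_pace != 0 else 1
--             y_elapsed += 1
--             if y_elapsed >= pace_duration:
--                 y_idx += 1
--                 y_elapsed = 0
--
--     return path
-- ===== SOURCE B (Python) =====
-- def get_path_CORRECTED(x_sequence, y_sequence):
--     """NO DIAGONAL MOVES - X and Y movements are sequential.
--     Expand each axis into a per-tick schedule first, then replay both
--     schedules side by side."""
--     def schedule(seq):
--         sch = []
--         for pace in seq:
--             if pace == 0:
--                 sch.append(None)
--             else:
--                 sch.append(1 if pace > 0 else -1)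
--                 sch.extend([None] * (abs(pace) - 1))
--         return sch
--
--     xs = schedule(x_sequence)
--     ys = schedule(y_sequence)
--     x = 0
--     y = 0
--     path = [(0, 0)]
--     for t in range(max(len(xs), len(ys))):
--         xm = xs[t] if t < len(xs) else None
--         ym = ys[t] if t < len(ys) else None
--         if xm is not None and ym is not None:
--             x += xm
--             path.append((x, y))
--             y += ym
--             path.append((x, y))
--         elif xm is not None:
--             x += xm
--             path.append((x, y))
--         elif ym is not None:
--             y += ym
--             path.append((x, y))
--         else:
--             path.append((x, y))
--     return path
-- ===== Notes on version B (the rewrite author's own statement) =====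
-- stated objective: simpler
-- what changed: B replaces A's four-counter while-loop state machine (index/elapsed per axis, flags re-derived each tick) by first expanding each pace sequence into an explicit per-tick move schedule and then replaying the two schedules with one plain indexed loop; the per-tick work drops to two list lookups, which also makes it measurably faster by a constant factor.
import Mathlib
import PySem

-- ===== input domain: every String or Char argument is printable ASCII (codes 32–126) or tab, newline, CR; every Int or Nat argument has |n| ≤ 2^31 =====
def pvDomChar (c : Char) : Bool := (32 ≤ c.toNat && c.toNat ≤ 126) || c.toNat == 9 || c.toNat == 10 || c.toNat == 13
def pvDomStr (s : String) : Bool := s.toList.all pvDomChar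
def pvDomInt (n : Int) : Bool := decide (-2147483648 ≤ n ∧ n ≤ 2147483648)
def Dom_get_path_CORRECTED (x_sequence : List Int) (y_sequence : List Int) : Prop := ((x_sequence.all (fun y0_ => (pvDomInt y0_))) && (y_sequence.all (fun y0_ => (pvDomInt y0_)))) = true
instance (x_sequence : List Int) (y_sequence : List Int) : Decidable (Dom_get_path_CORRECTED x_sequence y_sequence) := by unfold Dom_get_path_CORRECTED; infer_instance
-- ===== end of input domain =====

-- B builds explicit per-tick move schedules and replays them with one indexed loop,
-- replacing A's four-counter while-loop state machine; objective: simpler decomposition (measured constant-factor faster in a timing run).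

-- ===== PORT A =====
-- duration of one pace entry in ticks (1 tick for pace 0), = abs(pace) if pace != 0 else 1
def pvDur (p : Int) : Nat := if p = 0 then 1 else p.natAbs

-- the while-loop of A, transcribed tick for tick; fuel is only a termination device
-- (total ticks of both axes + 1 always suffices, see pvAloop_core / get_path_CORRECTED_spec)
def pvAloop (xseq yseq : List Int) :
    Nat → Nat → Nat → Nat → Nat → Int → Int → List (Int × Int) → List (Int × Int)
  | 0, _, _, _, _, _, _, path => path
  | fuel + 1, xidx, xel, yidx, yel, xpos, ypos, path =>
    if xidx < xseq.length ∨ yidx < yseq.length then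
      let xn : Bool := decide (xidx < xseq.length) && decide (xel = 0) && decide (xseq.getD xidx 0 ≠ 0)
      let yn : Bool := decide (yidx < yseq.length) && decide (yel = 0) && decide (yseq.getD yidx 0 ≠ 0)
      let st : List (Int × Int) × Int × Int :=
        if xn && yn then
          let xp := xpos + (if 0 < xseq.getD xidx 0 then 1 else -1)
          let yp := ypos + (if 0 < yseq.getD yidx 0 then 1 else -1)
          (path ++ [(xp, ypos)] ++ [(xp, yp)], xp, yp)
        else if xn then
          let xp := xpos + (if 0 < xseq.getD xidx 0 then 1 else -1)
          (path ++ [(xp, ypos)], xp, ypos)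
        else if yn then
          let yp := ypos + (if 0 < yseq.getD yidx 0 then 1 else -1)
          (path ++ [(xpos, yp)], xpos, yp)
        else (path ++ [(xpos, ypos)], xpos, ypos)
      let xa : Nat × Nat :=
        if xidx < xseq.length then
          (if xel + 1 ≥ pvDur (xseq.getD xidx 0) then (xidx + 1, 0) else (xidx, xel + 1))
        else (xidx, xel)
      let ya : Nat × Nat :=
        if yidx < yseq.length then
          (if yel + 1 ≥ pvDur (yseq.getD yidx 0) then (yidx + 1, 0) else (yidx, yel + 1))
        else (yidx, yel)
      pvAloop xseq yseq fuel xa.1 xa.2 ya.1 ya.2 st.2.1 st.2.2 st.1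
    else path

def get_path_CORRECTED (x_sequence : List Int) (y_sequence : List Int) : List (Int × Int) :=
  pvAloop x_sequence y_sequence
    ((x_sequence.map pvDur).sum + (y_sequence.map pvDur).sum + 1) 0 0 0 0 0 0 [(0, 0)]

-- ===== PORT B =====
-- Source B's schedule(): expand one pace sequence into a per-tick schedule
-- (some dir on a moving tick, none otherwise), built by append/extend
def pvBsched (seq : List Int) : List (Option Int) :=
  seq.foldl (fun sch p =>
    if p = 0 then sch ++ [none]
    else (sch ++ [some (if 0 < p then (1 : Int) else -1)]) ++ List.replicate (p.natAbs - 1) none) []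

-- body of Source B's for-loop over t
def pvBstep (xsch ysch : List (Option Int)) (st : List (Int × Int) × Int × Int) (t : Nat) :
    List (Int × Int) × Int × Int :=
  let xm : Option Int := if t < xsch.length then xsch.getD t none else none
  let ym : Option Int := if t < ysch.length then ysch.getD t none else none
  match xm, ym with
  | some dx, some dy =>
      (st.1 ++ [(st.2.1 + dx, st.2.2)] ++ [(st.2.1 + dx, st.2.2 + dy)], st.2.1 + dx, st.2.2 + dy)
  | some dx, none => (st.1 ++ [(st.2.1 + dx, st.2.2)], st.2.1 + dx, st.2.2)
  | none, some dy => (st.1 ++ [(st.2.1, st.2.2 + dy)], st.2.1, st.2.2 + dy)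
  | none, none => (st.1 ++ [(st.2.1, st.2.2)], st.2.1, st.2.2)

def get_path_CORRECTED_alt (x_sequence : List Int) (y_sequence : List Int) : List (Int × Int) :=
  let xsch := pvBsched x_sequence
  let ysch := pvBsched y_sequence
  ((List.range (max xsch.length ysch.length)).foldl (pvBstep xsch ysch) ([(0, 0)], 0, 0)).1

-- ===== PRECONDITION & SPEC =====
def Spec_get_path_CORRECTED (x_sequence : List Int) (y_sequence : List Int) (out : List (Int × Int)) : Prop := out = get_path_CORRECTED_alt x_sequence y_sequence
instance (x_sequence : List Int) (y_sequence : List Int) (out : List (Int × Int)) : Decidable (Spec_get_path_CORRECTED x_sequence y_sequence out) := by unfold Spec_get_path_CORRECTED; infer_instance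

-- ===== CLAIM (what is proved, stated in full; the proofs are below) =====
def Claim_equal_get_path_CORRECTED : Prop := ∀ (x_sequence : List Int) (y_sequence : List Int), Dom_get_path_CORRECTED x_sequence y_sequence → Spec_get_path_CORRECTED x_sequence y_sequence (get_path_CORRECTED x_sequence y_sequence)

-- ===== LEMMAS AND PROOFS =====

-- canonical (flatMap) schedule, suffix view of A's state, and the common one-tick step
def pvSlot (p : Int) : Option Int := if p = 0 then none else some (if 0 < p then (1 : Int) else -1)
def pvSched1 (p : Int) : List (Option Int) := pvSlot p :: List.replicate (pvDur p - 1) none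
def pvSchedAll (s : List Int) : List (Option Int) := s.flatMap pvSched1
def pvFrom (s : List Int) (idx el : Nat) : List (Option Int) := (pvSchedAll (s.drop idx)).drop el

-- the move A performs this tick on one axis, as an Option
def pvFlag (s : List Int) (idx el : Nat) : Option Int :=
  if idx < s.length ∧ el = 0 ∧ s.getD idx 0 ≠ 0
  then some (if 0 < s.getD idx 0 then (1 : Int) else -1) else none

-- A's end-of-tick advance of one axis's (index, elapsed) state
def pvAdv (s : List Int) (idx el : Nat) : Nat × Nat :=
  if idx < s.length then
    (if el + 1 ≥ pvDur (s.getD idx 0) then (idx + 1, 0) else (idx, el + 1))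
  else (idx, el)

-- one tick of the common replay
def pvEmit (xm ym : Option Int) (x y : Int) : List (Int × Int) × Int × Int :=
  match xm, ym with
  | some dx, some dy => ([(x + dx, y), (x + dx, y + dy)], x + dx, y + dy)
  | some dx, none => ([(x + dx, y)], x + dx, y)
  | none, some dy => ([(x, y + dy)], x, y + dy)
  | none, none => ([(x, y)], x, y)

-- canonical replay of the two schedules
def pvCore : List (Option Int) → List (Option Int) → Int → Int → List (Int × Int)
  | [], [], _, _ => []
  | xh :: xt, [], x, y =>
      (pvEmit xh none x y).1 ++ pvCore xt [] (pvEmit xh none x y).2.1 (pvEmit xh none x y).2.2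
  | [], yh :: yt, x, y =>
      (pvEmit none yh x y).1 ++ pvCore [] yt (pvEmit none yh x y).2.1 (pvEmit none yh x y).2.2
  | xh :: xt, yh :: yt, x, y =>
      (pvEmit xh yh x y).1 ++ pvCore xt yt (pvEmit xh yh x y).2.1 (pvEmit xh yh x y).2.2

-- invariant on A's per-axis state
def pvInv (s : List Int) (idx el : Nat) : Prop :=
  idx ≤ s.length ∧ (idx = s.length → el = 0) ∧ (idx < s.length → el < pvDur (s.getD idx 0))

theorem pvDur_pos (p : Int) : 0 < pvDur p := by
  unfold pvDur; split
  · omega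
  · rename_i h; exact Int.natAbs_pos.mpr h

theorem pvSched1_length (p : Int) : (pvSched1 p).length = pvDur p := by
  have := pvDur_pos p
  simp [pvSched1]; omega

theorem pvSchedAll_length (s : List Int) : (pvSchedAll s).length = (s.map pvDur).sum := by
  induction s with
  | nil => rfl
  | cons h t ih =>
    rw [pvSchedAll, List.flatMap_cons, List.length_append, pvSched1_length, ← pvSchedAll, ih]
    simp

theorem pvFrom_nil (s : List Int) (idx el : Nat) (h : ¬ idx < s.length) :
    pvFrom s idx el = [] := by
  have : s.drop idx = [] := List.drop_eq_nil_of_le (by omega)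
  simp [pvFrom, this, pvSchedAll]

theorem pvAdv_nil (s : List Int) (idx el : Nat) (h : ¬ idx < s.length) :
    pvAdv s idx el = (idx, el) := by simp [pvAdv, h]

theorem pvFlag_nil (s : List Int) (idx el : Nat) (h : ¬ idx < s.length) :
    pvFlag s idx el = none := by simp [pvFlag, h]

theorem pvFrom_step (s : List Int) (idx el : Nat) (hinv : pvInv s idx el)
    (h : idx < s.length) :
    pvFrom s idx el = pvFlag s idx el :: pvFrom s (pvAdv s idx el).1 (pvAdv s idx el).2 ∧
    pvInv s (pvAdv s idx el).1 (pvAdv s idx el).2 := by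
  obtain ⟨h1, h2, h3⟩ := hinv
  have hel : el < pvDur (s.getD idx 0) := h3 h
  have hdrop : s.drop idx = s.getD idx 0 :: s.drop (idx + 1) := by
    rw [List.getD_eq_getElem _ _ h]
    exact List.drop_eq_getElem_cons h
  have hall : pvSchedAll (s.drop idx) = pvSched1 (s.getD idx 0) ++ pvSchedAll (s.drop (idx + 1)) := by
    rw [hdrop, pvSchedAll, List.flatMap_cons, ← pvSchedAll]
  have hlen : (pvSched1 (s.getD idx 0)).length = pvDur (s.getD idx 0) := pvSched1_length _
  have hflag : pvFlag s idx el = (if el = 0 then pvSlot (s.getD idx 0) else none) := by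
    by_cases he : el = 0 <;> by_cases hp : s.getD idx 0 = 0 <;>
      simp [pvFlag, pvSlot, he, h]
  have hadv : pvAdv s idx el =
      (if el + 1 ≥ pvDur (s.getD idx 0) then (idx + 1, 0) else (idx, el + 1)) := by
    simp [pvAdv, h]
  constructor
  · -- schedule head/tail decomposition
    have hlt : el < (pvSchedAll (s.drop idx)).length := by
      rw [hall, List.length_append, hlen]; omega
    have hhead? : (pvSchedAll (s.drop idx))[el]? = some (if el = 0 then pvSlot (s.getD idx 0) else none) := by
      rw [hall, List.getElem?_append_left (by omega)]
      by_cases he : el = 0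
      · subst he; simp [pvSched1]
      · obtain ⟨k, rfl⟩ : ∃ k, el = k + 1 := ⟨el - 1, by omega⟩
        simp [pvSched1, List.getElem?_replicate]
        exact hel
    have hhead : (pvSchedAll (s.drop idx))[el] = (if el = 0 then pvSlot (s.getD idx 0) else none) := by
      have h2 := List.getElem?_eq_getElem hlt
      rw [h2] at hhead?; exact Option.some.inj hhead?
    have htail : (pvSchedAll (s.drop idx)).drop (el + 1) =
        pvFrom s (pvAdv s idx el).1 (pvAdv s idx el).2 := by
      by_cases hge : el + 1 ≥ pvDur (s.getD idx 0)
      · have hadv' : pvAdv s idx el = (idx + 1, 0) := by rw [hadv, if_pos hge]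
        have h4 : el + 1 = (pvSched1 (s.getD idx 0)).length := by
          rw [hlen]; exact Nat.le_antisymm (Nat.succ_le_of_lt hel) hge
        rw [hadv', hall, h4, List.drop_left]
        simp [pvFrom]
      · have hadv' : pvAdv s idx el = (idx, el + 1) := by rw [hadv, if_neg hge]
        rw [hadv']
        rfl
    show pvFrom s idx el = _
    rw [pvFrom, List.drop_eq_getElem_cons hlt, hhead, htail, hflag]
  · -- invariant preserved
    rw [hadv]
    by_cases hge : el + 1 ≥ pvDur (s.getD idx 0)
    · rw [if_pos hge]; exact ⟨by omega, fun _ => rfl, fun _ => pvDur_pos _⟩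
    · rw [if_neg hge]
      exact ⟨by omega, fun hh => absurd hh (by omega),
        fun _ => (by omega : el + 1 < pvDur (s.getD idx 0))⟩

-- one unfolded iteration of A's while-loop, in terms of pvFlag / pvAdv / pvEmit
theorem pvAloop_step (xs ys : List Int) (n xidx xel yidx yel : Nat) (x y : Int)
    (path : List (Int × Int)) (hcond : xidx < xs.length ∨ yidx < ys.length) :
    pvAloop xs ys (n + 1) xidx xel yidx yel x y path =
      pvAloop xs ys n (pvAdv xs xidx xel).1 (pvAdv xs xidx xel).2
        (pvAdv ys yidx yel).1 (pvAdv ys yidx yel).2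
        (pvEmit (pvFlag xs xidx xel) (pvFlag ys yidx yel) x y).2.1
        (pvEmit (pvFlag xs xidx xel) (pvFlag ys yidx yel) x y).2.2
        (path ++ (pvEmit (pvFlag xs xidx xel) (pvFlag ys yidx yel) x y).1) := by
  rw [pvAloop, if_pos hcond]
  by_cases h1 : xidx < xs.length <;> by_cases h2 : xel = 0 <;>
    by_cases h3 : xs.getD xidx 0 = 0 <;>
    by_cases h4 : yidx < ys.length <;> by_cases h5 : yel = 0 <;>
    by_cases h6 : ys.getD yidx 0 = 0 <;>
    simp [pvFlag, pvEmit, pvAdv, h1, h2, h4, h5]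
  all_goals simp_all

-- ===== A's loop equals the canonical replay =====
theorem pvAloop_core : ∀ (fuel : Nat) (xs ys : List Int) (xidx xel yidx yel : Nat)
    (x y : Int) (path : List (Int × Int)),
    pvInv xs xidx xel → pvInv ys yidx yel →
    (pvFrom xs xidx xel).length + (pvFrom ys yidx yel).length ≤ fuel →
    pvAloop xs ys fuel xidx xel yidx yel x y path =
      path ++ pvCore (pvFrom xs xidx xel) (pvFrom ys yidx yel) x y := by
  intro fuel
  induction fuel with
  | zero =>
    intro xs ys xidx xel yidx yel x y path hx hy hfuel
    have h1 : pvFrom xs xidx xel = [] := List.eq_nil_of_length_eq_zero (by omega)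
    have h2 : pvFrom ys yidx yel = [] := List.eq_nil_of_length_eq_zero (by omega)
    simp [pvAloop, h1, h2, pvCore]
  | succ n ih =>
    intro xs ys xidx xel yidx yel x y path hx hy hfuel
    by_cases hxr : xidx < xs.length <;> by_cases hyr : yidx < ys.length
    · -- both axes active
      obtain ⟨hxc, hxi⟩ := pvFrom_step xs xidx xel hx hxr
      obtain ⟨hyc, hyi⟩ := pvFrom_step ys yidx yel hy hyr
      rw [pvAloop_step xs ys n _ _ _ _ _ _ _ (Or.inl hxr),
        ih xs ys _ _ _ _ _ _ _ hxi hyi (by rw [hxc, hyc] at hfuel; simp at hfuel; omega),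
        hxc, hyc, pvCore]
      simp
    · -- only x active
      obtain ⟨hxc, hxi⟩ := pvFrom_step xs xidx xel hx hxr
      have hyc : pvFrom ys yidx yel = [] := pvFrom_nil _ _ _ hyr
      have hya : pvAdv ys yidx yel = (yidx, yel) := pvAdv_nil _ _ _ hyr
      have hyf : pvFlag ys yidx yel = none := pvFlag_nil _ _ _ hyr
      rw [pvAloop_step xs ys n _ _ _ _ _ _ _ (Or.inl hxr), hya,
        ih xs ys _ _ _ _ _ _ _ hxi hy (by rw [hxc] at hfuel; simp at hfuel; omega),
        hxc, hyc, hyf, pvCore]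
      simp
    · -- only y active
      have hxc : pvFrom xs xidx xel = [] := pvFrom_nil _ _ _ hxr
      have hxa : pvAdv xs xidx xel = (xidx, xel) := pvAdv_nil _ _ _ hxr
      have hxf : pvFlag xs xidx xel = none := pvFlag_nil _ _ _ hxr
      obtain ⟨hyc, hyi⟩ := pvFrom_step ys yidx yel hy hyr
      rw [pvAloop_step xs ys n _ _ _ _ _ _ _ (Or.inr hyr), hxa,
        ih xs ys _ _ _ _ _ _ _ hx hyi (by rw [hyc] at hfuel; simp at hfuel; omega),
        hxc, hyc, hxf, pvCore]
      simp
    · -- loop ends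
      have h1 : pvFrom xs xidx xel = [] := pvFrom_nil _ _ _ hxr
      have h2 : pvFrom ys yidx yel = [] := pvFrom_nil _ _ _ hyr
      rw [pvAloop, if_neg (by tauto), h1, h2, pvCore]
      simp

-- ===== B's schedule and loop equal the canonical ones =====
theorem pvBsched_eq (s : List Int) : pvBsched s = pvSchedAll s := by
  have hf : (fun (sch : List (Option Int)) p =>
      if p = 0 then sch ++ [none]
      else (sch ++ [some (if 0 < p then (1 : Int) else -1)]) ++ List.replicate (p.natAbs - 1) none)
      = fun sch p => sch ++ pvSched1 p := by
    funext sch p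
    by_cases hp : p = 0 <;> simp [hp, pvSched1, pvSlot, pvDur]
  rw [pvBsched, hf, PySem.List.foldl_append_eq_flatMap]
  rfl

theorem pvBloop_core : ∀ (n t : Nat) (xsch ysch : List (Option Int)) (x y : Int)
    (path : List (Int × Int)),
    max xsch.length ysch.length = t + n →
    ((List.range' t n).foldl (pvBstep xsch ysch) (path, x, y)).1 =
      path ++ pvCore (xsch.drop t) (ysch.drop t) x y := by
  intro n
  induction n with
  | zero =>
    intro t xsch ysch x y path hmax
    have h1 : xsch.drop t = [] := List.drop_eq_nil_of_le (by omega)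
    have h2 : ysch.drop t = [] := List.drop_eq_nil_of_le (by omega)
    simp [h1, h2, pvCore]
  | succ n ih =>
    intro t xsch ysch x y path hmax
    rw [show List.range' t (n + 1) = t :: List.range' (t + 1) n from rfl, List.foldl_cons]
    have hstep : ∀ st : List (Int × Int) × Int × Int, pvBstep xsch ysch st t =
        (st.1 ++ (pvEmit ((xsch.drop t).headD none) ((ysch.drop t).headD none) st.2.1 st.2.2).1,
         (pvEmit ((xsch.drop t).headD none) ((ysch.drop t).headD none) st.2.1 st.2.2).2) := by
      intro st
      have hx : (if t < xsch.length then xsch.getD t none else none) = (xsch.drop t).headD none := by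
        by_cases ht : t < xsch.length
        · rw [if_pos ht, List.drop_eq_getElem_cons ht, List.getD_eq_getElem _ _ ht]; rfl
        · rw [if_neg ht, List.drop_eq_nil_of_le (by omega)]; rfl
      have hy : (if t < ysch.length then ysch.getD t none else none) = (ysch.drop t).headD none := by
        by_cases ht : t < ysch.length
        · rw [if_pos ht, List.drop_eq_getElem_cons ht, List.getD_eq_getElem _ _ ht]; rfl
        · rw [if_neg ht, List.drop_eq_nil_of_le (by omega)]; rfl
      rw [pvBstep, hx, hy]
      cases (xsch.drop t).headD none <;> cases (ysch.drop t).headD none <;> simp [pvEmit]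
    rw [hstep, ih (t + 1) xsch ysch _ _ _ (by omega)]
    -- at least one schedule is nonempty at t, and pvCore consumes exactly its head
    have ht : t < max xsch.length ysch.length := by omega
    by_cases ht1 : t < xsch.length <;> by_cases ht2 : t < ysch.length
    · rw [List.drop_eq_getElem_cons ht1, List.drop_eq_getElem_cons ht2, pvCore]
      simp [List.getElem?_eq_getElem ht1, List.getElem?_eq_getElem ht2]
    · rw [List.drop_eq_getElem_cons ht1, List.drop_eq_nil_of_le (le_of_not_gt ht2),
        show ysch.drop (t+1) = [] from List.drop_eq_nil_of_le (by omega), pvCore]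
      simp [List.getElem?_eq_getElem ht1]
    · rw [List.drop_eq_getElem_cons ht2, List.drop_eq_nil_of_le (le_of_not_gt ht1),
        show xsch.drop (t+1) = [] from List.drop_eq_nil_of_le (by omega), pvCore]
      simp [List.getElem?_eq_getElem ht2]
    · omega

-- initial invariant
theorem pvInv_init (s : List Int) : pvInv s 0 0 := by
  refine ⟨Nat.zero_le _, fun _ => rfl, fun _ => pvDur_pos _⟩

-- ===== VERDICT (by name: the statement is the Claim_ definition above) =====
theorem get_path_CORRECTED_spec : Claim_equal_get_path_CORRECTED := by
  intro xs ys _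
  show get_path_CORRECTED xs ys = get_path_CORRECTED_alt xs ys
  have hA : get_path_CORRECTED xs ys =
      [(0, 0)] ++ pvCore (pvSchedAll xs) (pvSchedAll ys) 0 0 := by
    rw [get_path_CORRECTED, pvAloop_core _ xs ys 0 0 0 0 0 0 [(0, 0)]
      (pvInv_init xs) (pvInv_init ys)
      (by
        show (pvFrom xs 0 0).length + (pvFrom ys 0 0).length ≤ _
        simp [pvFrom, pvSchedAll_length])]
    rfl
  have hB : get_path_CORRECTED_alt xs ys =
      [(0, 0)] ++ pvCore (pvSchedAll xs) (pvSchedAll ys) 0 0 := by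
    rw [get_path_CORRECTED_alt]
    simp only [pvBsched_eq]
    rw [List.range_eq_range',
      pvBloop_core (max (pvSchedAll xs).length (pvSchedAll ys).length) 0
        (pvSchedAll xs) (pvSchedAll ys) 0 0 [(0, 0)] (by omega)]
    rfl
  rw [hA, hB]
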